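-- pv_equiv track=rewrite | github.com/dawid27xx/webCrawler-cwk | crawler.py | phraseMatch
-- ===== SOURCE A (Python) =====
-- def phraseMatch(phrase, invertedIndex, candidatePages):
--     # Check whether subphrases appear in sequence in any candidate page
--     words = phrase.lower().split()
--     exactPages = []
--
--     for page in candidatePages:
--         # Collect positionss for each word
--         word_positions = []
--         for word in words:
--             positions = invertedIndex.get(word, {}).get(page, [])
--             word_positions.append(set(positions))
--
--         # Check for sequence of positions
--         possible_starts = word_positions[0]
--         for start_pos in possible_starts:
--             if all((start_pos + offset) in word_positions[offset] for offset in range(1, len(words))):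
--                 exactPages.append(page)
--                 break  # No need to check other positions
--     return exactPages
-- ===== SOURCE B (Python) =====
-- def phraseMatch(phrase, invertedIndex, candidatePages):
--     # B: shifted-intersection strategy — keep a shrinking set of viable start
--     # positions, narrowing it once per word offset, instead of probing every
--     # start position against every offset.
--     words = phrase.lower().split()
--     exactPages = []
--     for page in candidatePages:
--         result = set(invertedIndex.get(words[0], {}).get(page, []))
--         for offset in range(1, len(words)):
--             positions = set(invertedIndex.get(words[offset], {}).get(page, []))
--             result = {p for p in result if p + offset in positions}
--         if result:
--             exactPages.append(page)
--     return exactPages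
-- ===== Notes on version B (the rewrite author's own statement) =====
-- stated objective: alternative
-- what changed: A probes every start position of the first word against every offset (nested any/all scan); B keeps one shrinking set of viable start positions and narrows it once per word offset, appending the page iff the set ends nonempty.
import Mathlib
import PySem

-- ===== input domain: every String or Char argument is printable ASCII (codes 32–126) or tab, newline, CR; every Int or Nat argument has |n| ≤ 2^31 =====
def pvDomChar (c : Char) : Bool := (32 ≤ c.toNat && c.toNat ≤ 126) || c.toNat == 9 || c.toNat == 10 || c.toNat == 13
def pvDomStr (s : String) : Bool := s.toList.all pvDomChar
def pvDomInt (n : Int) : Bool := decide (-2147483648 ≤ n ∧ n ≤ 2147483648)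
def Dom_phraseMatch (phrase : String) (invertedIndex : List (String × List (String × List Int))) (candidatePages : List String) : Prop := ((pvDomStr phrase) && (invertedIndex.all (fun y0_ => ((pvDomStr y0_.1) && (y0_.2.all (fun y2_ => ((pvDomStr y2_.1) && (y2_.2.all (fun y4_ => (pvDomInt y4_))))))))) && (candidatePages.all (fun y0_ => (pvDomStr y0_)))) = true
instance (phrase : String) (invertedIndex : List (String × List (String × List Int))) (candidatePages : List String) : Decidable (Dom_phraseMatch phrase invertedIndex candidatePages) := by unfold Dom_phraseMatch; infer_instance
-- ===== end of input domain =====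

-- B replaces A's probe of every start position against every offset by a single
-- shrinking set of viable start positions narrowed once per offset (alternative
-- decomposition; same result, equivalence return-value only).

-- shared helper: invertedIndex.get(word, {}).get(page, [])
def pvGetPos (invertedIndex : List (String × List (String × List Int))) (word page : String) : List Int :=
  PySem.Dict.getD (PySem.Dict.ofList ((PySem.Dict.ofList invertedIndex).getD word [])) page []

-- ===== PORT A =====
def phraseMatch (phrase : String) (invertedIndex : List (String × List (String × List Int))) (candidatePages : List String) : List String :=
  let words := PySem.Str.split₀ (PySem.Str.lower phrase)
  candidatePages.foldl (fun exactPages page =>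
    -- word_positions: one set per word
    let wordPositions : List (PySem.Set Int) :=
      words.foldl (fun acc word => acc ++ [PySem.Set.ofList (pvGetPos invertedIndex word page)]) []
    -- word_positions[0]; Pre_ guarantees words ≠ [] (Python raises IndexError otherwise)
    let possibleStarts : PySem.Set Int := PySem.List.pyGetD wordPositions 0 []
    -- for start_pos in possible_starts: if all(...): append page; break
    -- (the loop appends the page at most once, so the result is order-independent)
    if possibleStarts.any (fun startPos =>
        (PySem.List.pyRange 1 (words.length : Int) 1).all (fun offset =>
          (PySem.List.pyGetD wordPositions offset ([] : List Int)).contains (startPos + offset)))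
    then exactPages ++ [page] else exactPages) []

-- ===== PORT B =====
def phraseMatch_alt (phrase : String) (invertedIndex : List (String × List (String × List Int))) (candidatePages : List String) : List String :=
  let words := PySem.Str.split₀ (PySem.Str.lower phrase)
  candidatePages.foldl (fun exactPages page =>
    -- result starts as the positions of words[0] (Pre_ guarantees words ≠ [])
    let result : PySem.Set Int :=
      (PySem.List.pyRange 1 (words.length : Int) 1).foldl (fun res offset =>
        let positions : PySem.Set Int :=
          PySem.Set.ofList (pvGetPos invertedIndex (PySem.List.pyGetD words offset "") page)
        res.filter (fun p => positions.contains (p + offset)))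
        (PySem.Set.ofList (pvGetPos invertedIndex (PySem.List.pyGetD words 0 "") page))
    if result.isEmpty then exactPages else exactPages ++ [page]) []

-- ===== PRECONDITION & SPEC =====
-- Pre_ excludes exactly the inputs where Python A raises IndexError at word_positions[0]:
-- a phrase with no words while there is at least one candidate page (B raises there too).
def Pre_phraseMatch (phrase : String) (_invertedIndex : List (String × List (String × List Int))) (candidatePages : List String) : Prop :=
  0 < (PySem.Str.split₀ (PySem.Str.lower phrase)).length ∨ candidatePages = []
instance (phrase : String) (invertedIndex : List (String × List (String × List Int))) (candidatePages : List String) : Decidable (Pre_phraseMatch phrase invertedIndex candidatePages) := by unfold Pre_phraseMatch; infer_instance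

def pvWitness_phraseMatch : String × (List (String × List (String × List Int))) × List String :=
  ("big cat", [("big", [("p1", [0, 7])]), ("cat", [("p1", [1]), ("p2", [3])])], ["p1", "p2"])

def Spec_phraseMatch (phrase : String) (invertedIndex : List (String × List (String × List Int))) (candidatePages : List String) (out : List String) : Prop := out = phraseMatch_alt phrase invertedIndex candidatePages
instance (phrase : String) (invertedIndex : List (String × List (String × List Int))) (candidatePages : List String) (out : List String) : Decidable (Spec_phraseMatch phrase invertedIndex candidatePages out) := by unfold Spec_phraseMatch; infer_instance

-- ===== CLAIM (what is proved, stated in full; the proofs are below) =====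
def Claim_equal_phraseMatch : Prop := ∀ (phrase : String) (invertedIndex : List (String × List (String × List Int))) (candidatePages : List String), Dom_phraseMatch phrase invertedIndex candidatePages → Pre_phraseMatch phrase invertedIndex candidatePages → Spec_phraseMatch phrase invertedIndex candidatePages (phraseMatch phrase invertedIndex candidatePages)

-- ===== LEMMAS AND PROOFS =====

-- bool `all` respects pointwise equality on members
theorem pv_all_congr {α : Type} (l : List α) (p q : α → Bool) (h : ∀ x ∈ l, p x = q x) :
    l.all p = l.all q := by
  induction l with
  | nil => rfl
  | cons a l ih => simp [h a (by simp), ih fun x hx => h x (by simp [hx])]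

-- any = the filtered list being nonempty
theorem pv_any_eq_not_isEmpty_filter {α : Type} (l : List α) (p : α → Bool) :
    l.any p = !(l.filter p).isEmpty := by
  induction l with
  | nil => rfl
  | cons a l ih => by_cases h : p a <;> simp [h, ih]

-- folding a filter over a list of offsets = one filter by the conjunction
theorem pv_foldl_filter {α β : Type} (P : β → α → Bool) (l : List β) (r : List α) :
    l.foldl (fun res off => res.filter (P off)) r
      = r.filter (fun p => l.all (fun off => P off p)) := by
  induction l generalizing r with
  | nil => simp
  | cons o l ih =>
      simp only [List.foldl_cons, ih, List.filter_filter, List.all_cons]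
      apply List.filter_congr
      intro x _
      simp [Bool.and_comm]

-- A's per-page test (probe each start against each offset) agrees with
-- B's per-page test (narrow one set of starts once per offset, nonempty at the end)
theorem pv_page_eq (words : List String)
    (invertedIndex : List (String × List (String × List Int))) (page : String)
    (hw : words ≠ []) :
    ((PySem.List.pyGetD (words.foldl (fun acc word => acc ++ [PySem.Set.ofList (pvGetPos invertedIndex word page)]) ([] : List (PySem.Set Int))) 0 ([] : PySem.Set Int)).any (fun startPos =>
        (PySem.List.pyRange 1 (words.length : Int) 1).all (fun offset =>
          (PySem.List.pyGetD (words.foldl (fun acc word => acc ++ [PySem.Set.ofList (pvGetPos invertedIndex word page)]) ([] : List (PySem.Set Int))) offset ([] : PySem.Set Int)).contains (startPos + offset))))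
     = !((PySem.List.pyRange 1 (words.length : Int) 1).foldl (fun res offset =>
          res.filter (fun p =>
            (PySem.Set.ofList (pvGetPos invertedIndex (PySem.List.pyGetD words offset "") page)).contains (p + offset)))
          (PySem.Set.ofList (pvGetPos invertedIndex (PySem.List.pyGetD words 0 "") page))).isEmpty := by
  have hmap : words.foldl (fun acc word => acc ++ [PySem.Set.ofList (pvGetPos invertedIndex word page)]) ([] : List (PySem.Set Int))
      = words.map (fun word => PySem.Set.ofList (pvGetPos invertedIndex word page)) := by
    simpa using PySem.List.foldl_append_singleton_eq_map (l := words)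
      (f := fun word => PySem.Set.ofList (pvGetPos invertedIndex word page))
  simp only [hmap]
  rw [pv_foldl_filter]
  have h0 : PySem.List.pyGetD (words.map (fun word => PySem.Set.ofList (pvGetPos invertedIndex word page))) 0 ([] : List Int)
      = PySem.Set.ofList (pvGetPos invertedIndex (PySem.List.pyGetD words 0 "") page) := by
    cases words with
    | nil => exact absurd rfl hw
    | cons w ws => simp [PySem.List.pyGetD, PySem.List.pyGet?, PySem.List.pyIdx?]
  rw [h0, pv_any_eq_not_isEmpty_filter]
  congr 2
  apply List.filter_congr
  intro startPos _
  apply pv_all_congr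
  intro offset hmem
  obtain ⟨h1, h2⟩ := (PySem.List.mem_pyRange_one).mp hmem
  obtain ⟨k, rfl, hklt⟩ : ∃ k : Nat, offset = (k : Int) ∧ k < words.length :=
    ⟨offset.toNat, by omega, by omega⟩
  rw [PySem.List.pyGetD_natCast, PySem.List.pyGetD_natCast]
  rw [List.getD_eq_getElem _ _ (by simpa using hklt), List.getD_eq_getElem _ _ hklt]
  simp

-- ===== VERDICT (by name: the statement is the Claim_ definition above) =====
theorem phraseMatch_spec : Claim_equal_phraseMatch := by
  intro phrase invertedIndex candidatePages _ hpre
  unfold Spec_phraseMatch phraseMatch phraseMatch_alt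
  rcases hpre with hw0 | hnil
  · have hw : PySem.Str.split₀ (PySem.Str.lower phrase) ≠ [] := List.ne_nil_of_length_pos hw0
    have hstep := pv_page_eq (PySem.Str.split₀ (PySem.Str.lower phrase)) invertedIndex
    apply List.foldl_ext
    intro exactPages page _
    dsimp only
    simp only [hstep page hw]
    by_cases h : ((PySem.List.pyRange 1 ((PySem.Str.split₀ (PySem.Str.lower phrase)).length : Int) 1).foldl
        (fun res offset => res.filter (fun p =>
          (PySem.Set.ofList (pvGetPos invertedIndex (PySem.List.pyGetD (PySem.Str.split₀ (PySem.Str.lower phrase)) offset "") page)).contains (p + offset)))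
        (PySem.Set.ofList (pvGetPos invertedIndex (PySem.List.pyGetD (PySem.Str.split₀ (PySem.Str.lower phrase)) 0 "") page))).isEmpty
    · rw [h]
      simp only [Bool.not_true, if_neg (by decide : ¬ (false = true)), if_pos trivial]
    · rw [Bool.not_eq_true] at h
      rw [h]
      simp only [Bool.not_false, if_pos trivial, if_neg (by decide : ¬ (false = true))]
  · subst hnil; simp only [List.foldl_nil]
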